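-- pv_equiv track=rewrite | github.com/sanjeev21095/wordle | wordle/rules.py | yellow_cycle
-- ===== SOURCE A (Python) =====
-- from typing import List, Dict, Tuple
--
-- def yellow_cycle(truth: List[str], word_entered: List[str], tags: Dict[int, str]) -> Tuple:
--     for i in range(len(word_entered)):
--         char = word_entered[i]
--         pos = i
--         if char is not "$":
--             if char in truth:
--                 tags[pos] = "yellow"
--                 index = truth.index(char)
--                 truth[index] = "$"
--                 word_entered[pos] = "$"
--     return truth, word_entered, tags
-- ===== SOURCE B (Python) =====
-- def yellow_cycle(truth, word_entered, tags):
--     # Staged counting approach: per-letter quotas min(count in word, count in truth),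
--     # then two independent rewrite passes; no membership scans or index consumption.
--     t_count = {}
--     for ch in truth:
--         t_count[ch] = t_count.get(ch, 0) + 1
--     w_count = {}
--     for ch in word_entered:
--         if ch != "$":
--             w_count[ch] = w_count.get(ch, 0) + 1
--
--     def quota(ch):
--         return min(w_count.get(ch, 0), t_count.get(ch, 0))
--
--     used_t = {}
--     new_truth = []
--     for ch in truth:
--         u = used_t.get(ch, 0)
--         if ch != "$" and u < quota(ch):
--             new_truth.append("$")
--             used_t[ch] = u + 1
--         else:
--             new_truth.append(ch)
--
--     used_w = {}
--     new_word = []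
--     for i, ch in enumerate(word_entered):
--         u = used_w.get(ch, 0)
--         if ch != "$" and u < quota(ch):
--             new_word.append("$")
--             used_w[ch] = u + 1
--             tags[i] = "yellow"
--         else:
--             new_word.append(ch)
--     return new_truth, new_word, tags
-- ===== Notes on version B (the rewrite author's own statement) =====
-- stated objective: faster
-- what changed: Instead of scanning truth for membership and first index at every word letter and consuming occurrences in place, B counts letters once, derives per-letter quotas min(count in word, count in truth), and produces the blanked truth and word in two independent counting rewrite passes.
import Mathlib
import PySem

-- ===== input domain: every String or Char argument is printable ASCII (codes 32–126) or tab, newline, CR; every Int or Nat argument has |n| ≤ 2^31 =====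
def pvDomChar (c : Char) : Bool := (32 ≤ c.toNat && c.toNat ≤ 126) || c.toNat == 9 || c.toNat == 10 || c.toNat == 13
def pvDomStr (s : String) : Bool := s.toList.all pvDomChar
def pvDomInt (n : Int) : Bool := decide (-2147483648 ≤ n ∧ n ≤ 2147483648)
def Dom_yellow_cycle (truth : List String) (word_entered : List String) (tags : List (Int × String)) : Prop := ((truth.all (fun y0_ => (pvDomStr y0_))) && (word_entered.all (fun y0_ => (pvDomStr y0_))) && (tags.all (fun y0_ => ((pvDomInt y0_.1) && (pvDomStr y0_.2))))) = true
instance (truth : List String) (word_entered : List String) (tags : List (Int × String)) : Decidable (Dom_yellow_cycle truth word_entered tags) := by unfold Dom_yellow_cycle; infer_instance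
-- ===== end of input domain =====

-- B replaces A's per-letter scans of `truth` by per-letter counts and quotas min(count in word,
-- count in truth), rewriting truth and word in two independent counting passes (objective: faster).
-- Both Pythons return their result; A mutates truth/word_entered in place while B builds new lists
-- (tags is mutated by both); the equivalence proved here is about the return value.


-- ===== PORT A =====
-- the `for i in range(len(word_entered))` loop; writes to word_entered happen only at the
-- current index i, so walking the word list structurally reads the same values as A does
def yellowA (truth : List String) (word : List String) (i : Int)
    (tags : PySem.Dict Int String) : List String × List String × PySem.Dict Int String :=
  match word with
  | [] => (truth, [], tags)
  | char :: rest =>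
    if char ≠ "$" then                                     -- `if char is not "$"` ("$" is interned)
      if truth.contains char then                          -- `if char in truth`
        let index := (PySem.List.index? truth char).getD 0 -- `truth.index(char)` (guarded: some)
        let r := yellowA (truth.set index "$") rest (i + 1) (tags.insert i "yellow")
        (r.1, "$" :: r.2.1, r.2.2)                         -- word_entered[pos] = "$"
      else
        let r := yellowA truth rest (i + 1) tags
        (r.1, char :: r.2.1, r.2.2)
    else
      let r := yellowA truth rest (i + 1) tags
      (r.1, char :: r.2.1, r.2.2)

def yellow_cycle (truth : List String) (word_entered : List String) (tags : List (Int × String)) : List String × List String × (List (Int × String)) :=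
  let r := yellowA truth word_entered 0 (PySem.Dict.mk tags)
  (r.1, r.2.1, r.2.2.items)

-- ===== PORT B =====
-- `t_count[ch] = t_count.get(ch, 0) + 1` over truth
def tCountB (truth : List String) : PySem.Dict String Int :=
  truth.foldl (fun d ch => d.insert ch (d.getD ch 0 + 1)) PySem.Dict.empty

-- `if ch != "$": w_count[ch] = w_count.get(ch, 0) + 1` over word_entered
def wCountB (word : List String) : PySem.Dict String Int :=
  word.foldl (fun d ch => if ch ≠ "$" then d.insert ch (d.getD ch 0 + 1) else d) PySem.Dict.empty

-- `def quota(ch): return min(w_count.get(ch, 0), t_count.get(ch, 0))`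
def quotaB (wc tc : PySem.Dict String Int) (ch : String) : Int :=
  min (wc.getD ch 0) (tc.getD ch 0)

-- the truth rewrite loop, carrying `used_t`
def truthPassB (wc tc : PySem.Dict String Int) (used : PySem.Dict String Int) :
    List String → List String
  | [] => []
  | ch :: rest =>
    let u := used.getD ch 0
    if ch ≠ "$" ∧ u < quotaB wc tc ch then
      "$" :: truthPassB wc tc (used.insert ch (u + 1)) rest
    else
      ch :: truthPassB wc tc used rest

-- the word rewrite loop over enumerate(word_entered), carrying `used_w` and mutating tags
def wordPassB (wc tc : PySem.Dict String Int) (used : PySem.Dict String Int) (i : Int)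
    (tags : PySem.Dict Int String) : List String → List String × PySem.Dict Int String
  | [] => ([], tags)
  | ch :: rest =>
    let u := used.getD ch 0
    if ch ≠ "$" ∧ u < quotaB wc tc ch then
      let r := wordPassB wc tc (used.insert ch (u + 1)) (i + 1) (tags.insert i "yellow") rest
      ("$" :: r.1, r.2)
    else
      let r := wordPassB wc tc used (i + 1) tags rest
      (ch :: r.1, r.2)

def yellow_cycle_alt (truth : List String) (word_entered : List String) (tags : List (Int × String)) : List String × List String × (List (Int × String)) :=
  let tc := tCountB truth
  let wc := wCountB word_entered
  let newTruth := truthPassB wc tc PySem.Dict.empty truth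
  let r := wordPassB wc tc PySem.Dict.empty 0 (PySem.Dict.mk tags) word_entered
  (newTruth, r.1, r.2.items)

-- ===== PRECONDITION & SPEC =====
def Spec_yellow_cycle (truth : List String) (word_entered : List String) (tags : List (Int × String)) (out : List String × List String × (List (Int × String))) : Prop := out = yellow_cycle_alt truth word_entered tags
instance (truth : List String) (word_entered : List String) (tags : List (Int × String)) (out : List String × List String × (List (Int × String))) : Decidable (Spec_yellow_cycle truth word_entered tags out) := by unfold Spec_yellow_cycle; infer_instance

-- ===== CLAIM (what is proved, stated in full; the proofs are below) =====
def Claim_equal_yellow_cycle : Prop := ∀ (truth : List String) (word_entered : List String) (tags : List (Int × String)), Dom_yellow_cycle truth word_entered tags → Spec_yellow_cycle truth word_entered tags (yellow_cycle truth word_entered tags)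

-- ===== LEMMAS AND PROOFS =====

-- reference function: blank, per letter c ≠ "$", the first (m c) occurrences of c
def blankF (m : String → Nat) : List String → List String
  | [] => []
  | x :: xs =>
    if x ≠ "$" ∧ 0 < m x then "$" :: blankF (fun c => if c = x then m x - 1 else m c) xs
    else x :: blankF m xs

-- reference function: mark word letters while a per-letter budget t lasts
def wordF (t : String → Nat) (i : Int) (tags : PySem.Dict Int String) :
    List String → List String × PySem.Dict Int String
  | [] => ([], tags)
  | ch :: rest =>
    if ch ≠ "$" ∧ 0 < t ch then
      let r := wordF (fun c => if c = ch then t ch - 1 else t c) (i + 1) (tags.insert i "yellow") rest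
      ("$" :: r.1, r.2)
    else
      let r := wordF t (i + 1) tags rest
      (ch :: r.1, r.2)

-- per-letter quota: how many occurrences of c get blanked / marked
def mQ (word truth : List String) (c : String) : Nat :=
  if c = "$" then 0 else min (word.count c) (truth.count c)

theorem wordF_congr (s : List String) : ∀ (t t' : String → Nat) (i : Int)
    (tags : PySem.Dict Int String), (∀ c, c ≠ "$" → t c = t' c) →
    wordF t i tags s = wordF t' i tags s := by
  induction s with
  | nil => intro t t' i tags _; rfl
  | cons ch rest ih =>
    intro t t' i tags h
    by_cases hch : ch = "$"
    · simp only [wordF, hch, ne_eq, not_true_eq_false, false_and, if_false]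
      rw [ih t t' _ _ h]
    · have ht : t ch = t' ch := h ch hch
      by_cases hpos : 0 < t ch
      · have hp' : 0 < t' ch := ht ▸ hpos
        simp only [wordF]
        rw [if_pos ⟨hch, hpos⟩, if_pos ⟨hch, hp'⟩]
        rw [ih (fun c => if c = ch then t ch - 1 else t c)
            (fun c => if c = ch then t' ch - 1 else t' c) _ _ ?_]
        intro c hc
        by_cases hcc : c = ch
        · subst hcc; simp [ht]
        · simp [hcc, h c hc]
      · have hp' : ¬ 0 < t' ch := ht ▸ hpos
        simp only [wordF]
        rw [if_neg (fun hh => hpos hh.2), if_neg (fun hh => hp' hh.2)]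
        rw [ih t t' _ _ h]

theorem blankF_ext {m m' : String → Nat} (h : ∀ c, m c = m' c) (l : List String) :
    blankF m l = blankF m' l := by
  rw [funext h]

theorem blankF_zero (l : List String) : ∀ (m : String → Nat),
    (∀ c, c ≠ "$" → m c = 0) → blankF m l = l := by
  induction l with
  | nil => intro m _; rfl
  | cons x xs ih =>
    intro m h
    by_cases hx : x = "$"
    · simp only [blankF, hx, ne_eq, not_true_eq_false, false_and, if_false]
      rw [ih m h]
    · simp only [blankF, ne_eq, hx, not_false_eq_true, true_and, h x hx,
        lt_irrefl, if_false]
      rw [ih m h]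

-- A's `truth.index(char)` / `truth[index] = "$"` step: its effect on counts and on blankF
theorem first_idx (ch : String) (hch : ch ≠ "$") : ∀ (truth : List String), ch ∈ truth →
    ∃ n, PySem.List.index? truth ch = some n ∧
      (truth.set n "$").count ch = truth.count ch - 1 ∧
      (∀ c, c ≠ ch → c ≠ "$" → (truth.set n "$").count c = truth.count c) ∧
      (∀ m' : String → Nat,
        blankF (fun c => if c = ch then m' ch + 1 else m' c) truth = blankF m' (truth.set n "$")) := by
  intro truth
  induction truth with
  | nil => intro h; simp at h
  | cons x xs ih =>
    intro hmem
    by_cases hx : x = ch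
    · subst hx
      refine ⟨0, PySem.List.index?_cons_self x xs, ?_, ?_, ?_⟩
      · simp [List.count_cons, hch.symm]
      · intro c hc hd
        simp [List.count_cons, (show ¬ c = x from fun h => hc h),
          (show ¬ ("$" : String) = c from fun h => hd h.symm),
          (show ¬ x = c from fun h => hc h.symm)]
      · intro m'
        have h1 : blankF (fun c => if c = x then m' x + 1 else m' c) (x :: xs)
            = "$" :: blankF m' xs := by
          simp only [blankF]
          rw [if_pos ⟨hch, by simp⟩]
          congr 1
          apply blankF_ext
          intro c
          by_cases hc : c = x
          · subst hc; simp
          · simp [hc]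
        have h2 : blankF m' (("$" : String) :: xs) = "$" :: blankF m' xs := by
          simp only [blankF]
          rw [if_neg (fun hh => hh.1 rfl)]
        rw [List.set_cons_zero, h1, h2]
    · have hmem' : ch ∈ xs := by
        cases hmem with
        | head => exact absurd rfl hx
        | tail _ h => exact h
      obtain ⟨n, hidx, hcnt, hpres, hbl⟩ := ih hmem'
      refine ⟨n + 1, ?_, ?_, ?_, ?_⟩
      · rw [PySem.List.index?_cons_of_ne xs (fun h => hx h), hidx]; rfl
      · simp only [List.set_cons_succ, List.count_cons, hcnt]
        have : ¬ (ch = x) := fun h => hx h.symm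
        have hpos : 0 < xs.count ch := List.count_pos_iff.mpr hmem'
        simp [this]
        omega
      · intro c hc hd
        simp [List.set_cons_succ, List.count_cons, hpres c hc hd]
      · intro m'
        rw [List.set_cons_succ]
        by_cases hxd : x = "$"
        · -- head "$" is never blanked on either side
          subst hxd
          simp only [blankF, ne_eq, not_true_eq_false, false_and, if_false]
          rw [hbl m']
        · -- head x ≠ "$", x ≠ ch: same branch on both sides
          have hM : (if x = ch then m' ch + 1 else m' x) = m' x := by simp [hx]
          by_cases hpos : 0 < m' x
          · simp only [blankF]
            simp only [hM]
            rw [if_pos ⟨hxd, hpos⟩, if_pos ⟨hxd, hpos⟩]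
            congr 1
            rw [← hbl (fun c => if c = x then m' x - 1 else m' c)]
            apply blankF_ext
            intro c
            by_cases hc1 : c = x
            · subst hc1; simp [hx]
            · by_cases hc2 : c = ch
              · subst hc2; simp [hc1]
              · simp [hc1, hc2]
          · simp only [blankF]
            simp only [hM]
            rw [if_neg (fun hh => hpos hh.2), if_neg (fun hh => hpos hh.2)]
            congr 1
            exact hbl m' 

-- A's loop equals the reference functions
theorem yellowA_eq (word : List String) : ∀ (truth : List String) (i : Int)
    (tags : PySem.Dict Int String),
    yellowA truth word i tags
      = (blankF (mQ word truth) truth,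
         (wordF (fun c => truth.count c) i tags word).1,
         (wordF (fun c => truth.count c) i tags word).2) := by
  induction word with
  | nil =>
    intro truth i tags
    have : blankF (mQ [] truth) truth = truth := by
      apply blankF_zero
      intro c hc
      simp [mQ, hc]
    simp [yellowA, wordF, this]
  | cons ch rest ih =>
    intro truth i tags
    by_cases hch : ch = "$"
    · -- skipped letter
      subst hch
      simp only [yellowA, ne_eq, not_true_eq_false, if_false]
      rw [ih truth (i + 1) tags]
      have hm : mQ ("$" :: rest) truth = mQ rest truth := by
        funext c
        by_cases hc : c = "$"
        · simp [mQ, hc]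
        · simp [mQ, hc, List.count_cons, (show ¬ ("$" : String) = c from fun h => hc h.symm)]
      simp only [wordF, ne_eq, not_true_eq_false, false_and, if_false, hm]
    · by_cases hmem : ch ∈ truth
      · -- match: blank first occurrence, mark word letter
        obtain ⟨n, hidx, hcnt, hpres, hbl⟩ := first_idx ch hch truth hmem
        have hct : truth.contains ch = true := by
          simp only [List.contains_eq_mem, decide_eq_true_eq]; exact hmem
        have hpos : 0 < truth.count ch := List.count_pos_iff.mpr hmem
        simp only [yellowA, ne_eq, hch, not_false_eq_true, if_true, hct, hidx,
          Option.getD_some]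
        rw [ih (truth.set n "$") (i + 1) (tags.insert i "yellow")]
        have hmq : mQ (ch :: rest) truth
            = fun c => if c = ch then mQ rest (truth.set n "$") ch + 1
                       else mQ rest (truth.set n "$") c := by
          funext c
          by_cases hc : c = ch
          · subst hc
            simp only [mQ, hch, if_neg, if_pos rfl, hcnt, List.count_cons, if_pos rfl]
            simp [hch]
            omega
          · by_cases hd : c = "$"
            · simp [mQ, hd, hc, (show ¬ ("$" : String) = ch from fun h => hch h.symm)]
            · simp [mQ, hd, hc, List.count_cons, hpres c hc hd,
                (show ¬ ch = c from fun h => hc h.symm)]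
        have htr : blankF (mQ (ch :: rest) truth) truth
            = blankF (mQ rest (truth.set n "$")) (truth.set n "$") := by
          rw [hmq, hbl]
        have hwf : wordF (fun c => truth.count c) i tags (ch :: rest)
            = ("$" :: (wordF (fun c => (truth.set n "$").count c) (i + 1)
                  (tags.insert i "yellow") rest).1,
               (wordF (fun c => (truth.set n "$").count c) (i + 1)
                  (tags.insert i "yellow") rest).2) := by
          simp only [wordF, ne_eq, hch, not_false_eq_true, true_and, hpos, if_true]
          rw [wordF_congr rest _ (fun c => (truth.set n "$").count c) _ _ ?_]
          intro c hc
          by_cases hcc : c = ch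
          · subst hcc; simp [hcnt]
          · simp [hcc, hpres c hcc hc]
        rw [htr, hwf]
      · -- no match: letter absent from (remaining) truth
        have hct : truth.contains ch = false := by
          simp only [List.contains_eq_mem, decide_eq_false_iff_not]; exact hmem
        have hzero : truth.count ch = 0 := by
          simp [List.count_eq_zero]; exact hmem
        simp only [yellowA, ne_eq, hch, not_false_eq_true, if_true, hct,
          Bool.false_eq_true, if_false]
        rw [ih truth (i + 1) tags]
        have hm : mQ (ch :: rest) truth = mQ rest truth := by
          funext c
          by_cases hc : c = ch
          · subst hc; simp [mQ, hch, hzero]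
          · by_cases hd : c = "$"
            · simp [mQ, hd]
            · simp [mQ, hd, hc, List.count_cons, (show ¬ ch = c from fun h => hc h.symm)]
        simp only [wordF, ne_eq, hch, not_false_eq_true, true_and, hzero,
          lt_irrefl, if_false, hm]

-- B's counting dicts compute the counts
theorem tCountB_getD (truth : List String) (c : String) :
    (tCountB truth).getD c 0 = (truth.count c : Int) := by
  rw [tCountB, PySem.Dict.getD_foldl_insert_add_one, PySem.Dict.getD_empty]
  ring

theorem wCountB_getD_aux (word : List String) : ∀ (d : PySem.Dict String Int) (c : String),
    ((word.foldl (fun d ch => if ch ≠ "$" then d.insert ch (d.getD ch 0 + 1) else d) d).getD c 0)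
      = d.getD c 0 + (if c = "$" then 0 else (word.count c : Int)) := by
  induction word with
  | nil => intro d c; simp
  | cons x xs ih =>
    intro d c
    rw [List.foldl_cons, ih]
    by_cases hx : x = "$"
    · subst hx
      simp only [ne_eq, not_true_eq_false, if_false]
      by_cases hc : c = "$"
      · simp [hc]
      · simp [hc, List.count_cons, (show ¬ ("$" : String) = c from fun h => hc h.symm)]
    · simp only [ne_eq, hx, not_false_eq_true, if_true]
      by_cases hc : c = x
      · subst hc
        rw [PySem.Dict.getD_insert_self]
        simp [hx, List.count_cons]
        ring
      · rw [PySem.Dict.getD_insert_of_ne _ _ _ hc]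
        by_cases hd : c = "$"
        · simp [hd]
        · simp [hd, List.count_cons, (show ¬ x = c from fun h => hc h.symm)]

theorem wCountB_getD (word : List String) (c : String) :
    (wCountB word).getD c 0 = if c = "$" then 0 else (word.count c : Int) := by
  rw [wCountB, wCountB_getD_aux, PySem.Dict.getD_empty]
  ring

theorem quotaB_eq (word truth : List String) (c : String) :
    quotaB (wCountB word) (tCountB truth) c = (mQ word truth c : Int) := by
  rw [quotaB, wCountB_getD, tCountB_getD]
  by_cases hc : c = "$"
  · simp [hc, mQ]
  · simp [hc, mQ]

-- B's truth pass equals blankF with the remaining quotas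
theorem truthPassB_eq (word truth : List String) : ∀ (s : List String)
    (used : PySem.Dict String Int) (u : String → Nat),
    (∀ c, used.getD c 0 = (u c : Int)) →
    truthPassB (wCountB word) (tCountB truth) used s
      = blankF (fun c => mQ word truth c - u c) s := by
  intro s
  induction s with
  | nil => intro used u _; rfl
  | cons ch rest ih =>
    intro used u hu
    have hcond : (ch ≠ "$" ∧ used.getD ch 0 < quotaB (wCountB word) (tCountB truth) ch)
        ↔ (ch ≠ "$" ∧ 0 < mQ word truth ch - u ch) := by
      rw [hu ch, quotaB_eq]
      constructor
      · rintro ⟨h1, h2⟩; exact ⟨h1, by omega⟩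
      · rintro ⟨h1, h2⟩; exact ⟨h1, by omega⟩
    by_cases h : ch ≠ "$" ∧ 0 < mQ word truth ch - u ch
    · simp only [truthPassB, blankF, if_pos (hcond.mpr h), if_pos h]
      congr 1
      rw [ih (used.insert ch (used.getD ch 0 + 1)) (fun c => if c = ch then u ch + 1 else u c) ?_]
      · congr 1
        funext c
        by_cases hc : c = ch
        · subst hc; simp; omega
        · simp [hc]
      · intro c
        by_cases hc : c = ch
        · subst hc
          rw [PySem.Dict.getD_insert_self, hu c]
          simp
        · rw [PySem.Dict.getD_insert_of_ne _ _ _ hc, hu c]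
          simp [hc]
    · simp only [truthPassB, blankF, if_neg (fun hh => h (hcond.mp hh)), if_neg h]
      rw [ih used u hu]

-- B's word pass equals wordF with the remaining truth counts
theorem wordPassB_eq (word truth : List String) : ∀ (s : List String)
    (used : PySem.Dict String Int) (u : String → Nat) (i : Int) (tags : PySem.Dict Int String),
    (∀ c, used.getD c 0 = (u c : Int)) →
    (∀ c, c ≠ "$" → u c + s.count c ≤ word.count c) →
    wordPassB (wCountB word) (tCountB truth) used i tags s
      = wordF (fun c => truth.count c - u c) i tags s := by
  intro s
  induction s with
  | nil => intro used u i tags _ _; rfl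
  | cons ch rest ih =>
    intro used u i tags hu hinv
    by_cases hch : ch = "$"
    · have hnc : ¬ (ch ≠ "$" ∧ used.getD ch 0 < quotaB (wCountB word) (tCountB truth) ch) := by
        rintro ⟨h1, _⟩; exact h1 hch
      have hnc' : ¬ (ch ≠ "$" ∧ 0 < truth.count ch - u ch) := by
        rintro ⟨h1, _⟩; exact h1 hch
      simp only [wordPassB, wordF, if_neg hnc, if_neg hnc']
      rw [ih used u (i + 1) tags hu ?_]
      intro c hc
      have h1 := hinv c hc
      have h2 : rest.count c ≤ (ch :: rest).count c := by
        simp [List.count_cons]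
      omega
    · have hlt : u ch < word.count ch := by
        have := hinv ch hch
        have : 0 < (ch :: rest).count ch := by simp [List.count_cons]
        have := hinv ch hch
        simp [List.count_cons] at this
        omega
      have hcond : (ch ≠ "$" ∧ used.getD ch 0 < quotaB (wCountB word) (tCountB truth) ch)
          ↔ (ch ≠ "$" ∧ 0 < truth.count ch - u ch) := by
        rw [hu ch, quotaB_eq]
        simp only [mQ, hch, if_neg, if_false]
        constructor
        · rintro ⟨h1, h2⟩
          refine ⟨h1, ?_⟩
          simp [hch] at h2
          omega
        · rintro ⟨h1, h2⟩
          refine ⟨h1, ?_⟩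
          simp [hch]
          omega
      by_cases h : ch ≠ "$" ∧ 0 < truth.count ch - u ch
      · simp only [wordPassB, wordF, if_pos (hcond.mpr h), if_pos h]
        rw [ih (used.insert ch (used.getD ch 0 + 1)) (fun c => if c = ch then u ch + 1 else u c)
            (i + 1) (tags.insert i "yellow") ?_ ?_]
        · have harg : (fun c => truth.count c - (if c = ch then u ch + 1 else u c))
              = (fun c => if c = ch then truth.count ch - u ch - 1 else truth.count c - u c) := by
            funext c
            by_cases hc : c = ch
            · subst hc; simp; omega
            · simp [hc]
          rw [harg]
        · intro c
          by_cases hc : c = ch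
          · subst hc
            rw [PySem.Dict.getD_insert_self, hu c]
            simp
          · rw [PySem.Dict.getD_insert_of_ne _ _ _ hc, hu c]
            simp [hc]
        · intro c hc
          by_cases hcc : c = ch
          · subst hcc
            have h1 := hinv c hc
            simp [List.count_cons] at h1
            simp
            omega
          · have h1 := hinv c hc
            simp [List.count_cons, hcc] at h1
            simp [hcc]
            omega
      · simp only [wordPassB, wordF, if_neg (fun hh => h (hcond.mp hh)), if_neg h]
        rw [ih used u (i + 1) tags hu ?_]
        intro c hc
        have h1 := hinv c hc
        have hle : rest.count c ≤ (ch :: rest).count c := by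
          simp [List.count_cons]
        omega

-- ===== VERDICT (by name: the statement is the Claim_ definition above) =====
theorem yellow_cycle_spec : Claim_equal_yellow_cycle := by
  intro truth word tags _
  unfold Spec_yellow_cycle yellow_cycle yellow_cycle_alt
  dsimp only
  rw [yellowA_eq]
  have h0 : ∀ c : String, (PySem.Dict.empty : PySem.Dict String Int).getD c 0 = ((0 : Nat) : Int) := by
    intro c; rw [PySem.Dict.getD_empty]; rfl
  rw [truthPassB_eq word truth truth PySem.Dict.empty (fun _ => 0) h0]
  rw [wordPassB_eq word truth word PySem.Dict.empty (fun _ => 0) 0 (PySem.Dict.mk tags) h0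
      (fun c _ => by simp)]
  have h1 : (fun c => mQ word truth c - 0) = mQ word truth := by funext c; simp
  have h2 : (fun c : String => truth.count c - 0) = (fun c => truth.count c) := by
    funext c; simp
  rw [h1, h2]
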